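-- pv_equiv track=rewrite | github.com/CILAB-MA/gpudrive_lab | gpudrive/integrations/reasoning/data_extract.py | filter_qa_by_id
-- ===== SOURCE A (Python) =====
-- def filter_qa_by_id(questions, answers, qa_ids):
--     remove_keywords = ["pedestrian", "traffic light"]
--
--     qa = [
--         [q, a]
--         for q, a in zip(questions, answers)
--         if not (
--             any(f"#{qa_id}" in q or f"#{qa_id}" in a for qa_id in qa_ids) or
--             any(keyword in q.lower() or keyword in a.lower() for keyword in remove_keywords)
--         )
--     ]
--     return qa
-- ===== SOURCE B (Python) =====
-- def filter_qa_by_id(questions, answers, qa_ids):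
--     # One scan per string: at each '#', read the (sign+digits) token that follows
--     # and look its growing prefixes up in a precomputed set of id strings.
--     id_strs = {str(i) for i in qa_ids}
--
--     def digit_run(t):
--         out = ""
--         for ch in t:
--             if not ch.isdigit():
--                 break
--             out += ch
--         return out
--
--     def has_tag(s):
--         for i, ch in enumerate(s):
--             if ch == '#':
--                 rest = s[i + 1:]
--                 if rest.startswith('-'):
--                     tok = '-' + digit_run(rest[1:])
--                 else:
--                     tok = digit_run(rest)
--                 pre = ""
--                 for c in tok:
--                     pre += c
--                     if pre in id_strs:
--                         return True
--         return False
--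
--     def has_kw(s):
--         low = s.lower()
--         return "pedestrian" in low or "traffic light" in low
--
--     out = []
--     for q, a in zip(questions, answers):
--         if not (has_tag(q) or has_tag(a) or has_kw(q) or has_kw(a)):
--             out.append([q, a])
--     return out
-- ===== Notes on version B (the rewrite author's own statement) =====
-- stated objective: faster
-- what changed: Instead of testing every "#"+str(id) pattern against each string, B precomputes a set of id strings and makes one scan per string: at each '#' it parses the following sign+digit token and looks its growing prefixes up in the set.
import Mathlib
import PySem

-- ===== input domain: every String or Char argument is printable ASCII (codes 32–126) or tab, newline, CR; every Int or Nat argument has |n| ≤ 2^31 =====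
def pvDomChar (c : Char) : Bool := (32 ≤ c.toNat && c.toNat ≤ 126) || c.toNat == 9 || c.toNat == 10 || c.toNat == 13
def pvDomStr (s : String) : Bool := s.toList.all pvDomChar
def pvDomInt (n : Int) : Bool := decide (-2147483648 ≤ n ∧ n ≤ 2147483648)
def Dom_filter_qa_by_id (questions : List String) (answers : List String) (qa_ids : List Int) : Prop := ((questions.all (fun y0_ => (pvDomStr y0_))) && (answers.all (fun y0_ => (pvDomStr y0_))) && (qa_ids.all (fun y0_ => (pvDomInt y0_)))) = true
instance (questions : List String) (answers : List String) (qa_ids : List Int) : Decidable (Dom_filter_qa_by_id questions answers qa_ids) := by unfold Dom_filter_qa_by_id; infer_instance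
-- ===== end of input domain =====

-- B replaces the per-id substring scan by a single left-to-right scan per string that
-- parses the sign+digit token after each '#' and looks its prefixes up in a precomputed
-- set of id strings (objective: faster when there are many ids and few/no tags).


-- ===== PORT A =====
def filter_qa_by_id (questions : List String) (answers : List String) (qa_ids : List Int) : List (List String) :=
  let remove_keywords : List String := ["pedestrian", "traffic light"]
  ((questions.zip answers).filter (fun p =>
    !((qa_ids.any (fun qa_id =>
        PySem.Str.isIn ("#" ++ PySem.Int.toStr qa_id) p.1 ||
        PySem.Str.isIn ("#" ++ PySem.Int.toStr qa_id) p.2)) ||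
      (remove_keywords.any (fun kw =>
        PySem.Str.isIn kw (PySem.Str.lower p.1) ||
        PySem.Str.isIn kw (PySem.Str.lower p.2)))))).map (fun p => [p.1, p.2])

-- ===== PORT B =====
-- Source B's digit_run: the leading run of decimal digits
def pvDigitRun (t : List Char) : List Char := t.takeWhile PySem.Str.isdigit

-- Source B's token after a '#': optional '-' then the digit run
def pvTokenOf (rest : List Char) : List Char :=
  match rest with
  | [] => []
  | c :: r => if c == '-' then c :: pvDigitRun r else pvDigitRun (c :: r)

-- Source B's inner loop: grow pre over tok and test membership in the id-string set
def pvPrefHit (ids : PySem.Set (List Char)) (pre : List Char) : List Char → Bool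
  | [] => false
  | c :: t => PySem.Set.contains ids (pre ++ [c]) || pvPrefHit ids (pre ++ [c]) t

-- Source B's has_tag: scan the string once, probing at each '#'
def pvHasTag (ids : PySem.Set (List Char)) : List Char → Bool
  | [] => false
  | c :: t => (c == '#' && pvPrefHit ids [] (pvTokenOf t)) || pvHasTag ids t

-- Source B's has_kw
def pvHasKw (s : String) : Bool :=
  let low := PySem.Str.lower s
  PySem.Str.isIn "pedestrian" low || PySem.Str.isIn "traffic light" low

def filter_qa_by_id_alt (questions : List String) (answers : List String) (qa_ids : List Int) : List (List String) :=
  let idStrs : PySem.Set (List Char) := PySem.Set.ofList (qa_ids.map PySem.Int.toChars)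
  (questions.zip answers).foldl (fun out p =>
    if !(pvHasTag idStrs p.1.toList || pvHasTag idStrs p.2.toList || pvHasKw p.1 || pvHasKw p.2)
    then out ++ [[p.1, p.2]] else out) []

-- ===== PRECONDITION & SPEC =====
def Spec_filter_qa_by_id (questions : List String) (answers : List String) (qa_ids : List Int) (out : List (List String)) : Prop := out = filter_qa_by_id_alt questions answers qa_ids
instance (questions : List String) (answers : List String) (qa_ids : List Int) (out : List (List String)) : Decidable (Spec_filter_qa_by_id questions answers qa_ids out) := by unfold Spec_filter_qa_by_id; infer_instance

-- ===== CLAIM (what is proved, stated in full; the proofs are below) =====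
def Claim_equal_filter_qa_by_id : Prop := ∀ (questions : List String) (answers : List String) (qa_ids : List Int), Dom_filter_qa_by_id questions answers qa_ids → Spec_filter_qa_by_id questions answers qa_ids (filter_qa_by_id questions answers qa_ids)

-- ===== LEMMAS AND PROOFS =====

-- every char Nat.toDigitsCore 10 adds is a decimal digit
lemma pv_digitChar_isdigit (n : Nat) : PySem.Str.isdigit (Nat.digitChar (n % 10)) = true := by
  have h : n % 10 < 10 := Nat.mod_lt _ (by norm_num)
  set m := n % 10 with hm
  interval_cases m <;> decide

lemma pv_toDigitsCore_digits : ∀ (f n : Nat) (acc : List Char),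
    (∀ c ∈ acc, PySem.Str.isdigit c = true) →
    ∀ c ∈ Nat.toDigitsCore 10 f n acc, PySem.Str.isdigit c = true := by
  intro f
  induction f with
  | zero => intro n acc hacc c hc; simp [Nat.toDigitsCore] at hc; exact hacc c hc
  | succ f ih =>
    intro n acc hacc c hc
    simp only [Nat.toDigitsCore] at hc
    by_cases h : n / 10 = 0
    · simp [h] at hc
      rcases hc with hc | hc
      · subst hc; exact pv_digitChar_isdigit n
      · exact hacc c hc
    · simp [h] at hc
      refine ih (n / 10) _ ?_ c hc
      intro d hd
      rw [List.mem_cons] at hd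
      rcases hd with rfl | hd
      · exact pv_digitChar_isdigit n
      · exact hacc d hd

lemma pv_toDigitsCore_ne_nil_of_acc : ∀ (f n : Nat) (acc : List Char),
    acc ≠ [] → Nat.toDigitsCore 10 f n acc ≠ [] := by
  intro f
  induction f with
  | zero => intro n acc h; simpa [Nat.toDigitsCore] using h
  | succ f ih =>
    intro n acc h
    simp only [Nat.toDigitsCore]
    by_cases hd : n / 10 = 0
    · simp [hd]
    · simp only [hd, if_false]
      exact ih (n / 10) _ (by simp)

lemma pv_toDigits_ne_nil (n : Nat) : Nat.toDigits 10 n ≠ [] := by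
  show Nat.toDigitsCore 10 (n + 1) n [] ≠ []
  simp only [Nat.toDigitsCore]
  by_cases hd : n / 10 = 0
  · simp [hd]
  · simp only [hd, if_false]
    exact pv_toDigitsCore_ne_nil_of_acc _ _ _ (by simp)

lemma pv_toDigits_digits (n : Nat) : ∀ c ∈ Nat.toDigits 10 n, PySem.Str.isdigit c = true :=
  pv_toDigitsCore_digits (n + 1) n [] (by simp)

lemma pv_toChars_ne_nil (id : Int) : PySem.Int.toChars id ≠ [] := by
  unfold PySem.Int.toChars
  split
  · simp
  · exact pv_toDigits_ne_nil _

-- a string of digits is a prefix of t iff it is a prefix of t's leading digit run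
lemma pv_digit_prefix_run (w : List Char) (hw : ∀ c ∈ w, PySem.Str.isdigit c = true) :
    ∀ t : List Char, (w <+: t ↔ w <+: pvDigitRun t) := by
  induction w with
  | nil => intro t; simp
  | cons c w ihw =>
    intro t
    constructor
    · rintro h
      rcases t with _ | ⟨d, t⟩
      · simp at h
      · rw [List.cons_prefix_cons] at h
        obtain ⟨rfl, hpre⟩ := h
        have hc : PySem.Str.isdigit c = true := hw c (by simp)
        unfold pvDigitRun
        rw [List.takeWhile_cons_of_pos hc, List.cons_prefix_cons]
        exact ⟨rfl, (ihw (fun d hd => hw d (by simp [hd])) t).mp hpre⟩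
    · intro h
      exact h.trans (List.takeWhile_prefix _)

-- the key maximality fact: "#"+str(id) occurs right here iff str(id) is a prefix of the token
lemma pv_toChars_prefix_token (id : Int) (t : List Char) :
    PySem.Int.toChars id <+: t ↔ PySem.Int.toChars id <+: pvTokenOf t := by
  unfold PySem.Int.toChars
  split
  · -- negative: '-' :: digits
    rename_i hneg
    rcases t with _ | ⟨c, r⟩
    · simp [pvTokenOf]
    · by_cases hc : c = '-'
      · subst hc
        simp only [pvTokenOf, beq_self_eq_true, if_true]
        rw [List.cons_prefix_cons, List.cons_prefix_cons]
        exact and_congr_right fun _ =>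
          pv_digit_prefix_run _ (pv_toDigits_digits _) r
      · have hcb : (c == '-') = false := by simp [hc]
        simp only [pvTokenOf, hcb, Bool.false_eq_true, if_false]
        constructor
        · intro h
          rw [List.cons_prefix_cons] at h
          exact absurd h.1.symm hc
        · intro h
          unfold pvDigitRun at h
          by_cases hd : PySem.Str.isdigit c = true
          · rw [List.takeWhile_cons_of_pos hd, List.cons_prefix_cons] at h
            exact absurd h.1.symm hc
          · rw [List.takeWhile_cons_of_neg (by simpa using hd)] at h
            simp at h
  · -- nonnegative: all digits
    rename_i hpos
    have hdig := pv_toDigits_digits (Int.toNat id)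
    have hne := pv_toDigits_ne_nil (Int.toNat id)
    rcases t with _ | ⟨c, r⟩
    · simp [pvTokenOf]
    · by_cases hc : c = '-'
      · subst hc
        simp only [pvTokenOf, beq_self_eq_true, if_true]
        rcases hw : Nat.toDigits 10 (Int.toNat id) with _ | ⟨d, w⟩
        · exact absurd hw hne
        · have hd : PySem.Str.isdigit d = true := hdig d (by rw [hw]; simp)
          rw [List.cons_prefix_cons, List.cons_prefix_cons]
          have : d ≠ '-' := by intro h; rw [h] at hd; simp [PySem.Str.isdigit, PySem.Chars.isdigit] at hd
          constructor <;> (rintro ⟨h1, _⟩; exact absurd h1 this)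
      · have hcb : (c == '-') = false := by simp [hc]
        simp only [pvTokenOf, hcb]
        exact pv_digit_prefix_run _ hdig (c :: r)

-- Source B's growing-prefix loop finds exactly the nonempty prefixes present in the set
lemma pv_prefHit_iff (ids : PySem.Set (List Char)) :
    ∀ (l : List Char) (pre : List Char),
    (pvPrefHit ids pre l = true ↔ ∃ w, w ≠ [] ∧ w <+: l ∧ (pre ++ w) ∈ ids) := by
  intro l
  induction l with
  | nil =>
    intro pre
    simp only [pvPrefHit]
    constructor
    · intro h; cases h
    · rintro ⟨w, hne, hpre, _⟩
      simp at hpre; exact absurd hpre hne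
  | cons c t ih =>
    intro pre
    simp only [pvPrefHit, Bool.or_eq_true, PySem.Set.contains_iff, ih (pre ++ [c])]
    constructor
    · rintro (h | ⟨w, hne, hpre, hmem⟩)
      · exact ⟨[c], by simp, by simp, h⟩
      · exact ⟨c :: w, by simp, by rw [List.cons_prefix_cons]; exact ⟨rfl, hpre⟩,
          by simpa using hmem⟩
    · rintro ⟨w, hne, hpre, hmem⟩
      rcases w with _ | ⟨d, w⟩
      · exact absurd rfl hne
      · rw [List.cons_prefix_cons] at hpre
        obtain ⟨rfl, hpre⟩ := hpre
        rcases w with _ | ⟨e, w⟩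
        · exact Or.inl (by simpa using hmem)
        · exact Or.inr ⟨e :: w, by simp, hpre, by simpa using hmem⟩

-- the single scan finds a tag iff some "#"+str(id) is a substring
lemma pv_hasTag_iff (qa_ids : List Int) (s : List Char) :
    pvHasTag (PySem.Set.ofList (qa_ids.map PySem.Int.toChars)) s = true ↔
    ∃ id ∈ qa_ids, ('#' :: PySem.Int.toChars id) <:+: s := by
  induction s with
  | nil =>
    simp only [pvHasTag]
    constructor
    · intro h; cases h
    · rintro ⟨id, _, hinf⟩
      have := List.eq_nil_of_infix_nil hinf
      simp at this
  | cons c t ih =>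
    simp only [pvHasTag, Bool.or_eq_true, Bool.and_eq_true, beq_iff_eq, ih]
    have hProbe : (c = '#' ∧ pvPrefHit (PySem.Set.ofList (qa_ids.map PySem.Int.toChars)) [] (pvTokenOf t) = true)
        ↔ ∃ id ∈ qa_ids, ('#' :: PySem.Int.toChars id) <+: c :: t := by
      rw [pv_prefHit_iff]
      constructor
      · rintro ⟨rfl, w, hne, hpre, hmem⟩
        simp only [List.nil_append] at hmem
        rw [PySem.Set.mem_ofList, List.mem_map] at hmem
        obtain ⟨id, hid, rfl⟩ := hmem
        refine ⟨id, hid, ?_⟩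
        rw [List.cons_prefix_cons]
        exact ⟨rfl, (pv_toChars_prefix_token id t).mpr hpre⟩
      · rintro ⟨id, hid, hpre⟩
        rw [List.cons_prefix_cons] at hpre
        obtain ⟨hc, hpre⟩ := hpre
        refine ⟨hc.symm, PySem.Int.toChars id, pv_toChars_ne_nil id,
          (pv_toChars_prefix_token id t).mp hpre, ?_⟩
        simp only [List.nil_append]
        rw [PySem.Set.mem_ofList, List.mem_map]
        exact ⟨id, hid, rfl⟩
    constructor
    · rintro (h | ⟨id, hid, hinf⟩)
      · obtain ⟨id, hid, hpre⟩ := hProbe.mp h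
        exact ⟨id, hid, hpre.isInfix⟩
      · exact ⟨id, hid, hinf.trans (List.suffix_cons c t).isInfix⟩
    · rintro ⟨id, hid, hinf⟩
      rw [List.infix_cons_iff] at hinf
      rcases hinf with hpre | hinf
      · exact Or.inl (hProbe.mpr ⟨id, hid, hpre⟩)
      · exact Or.inr ⟨id, hid, hinf⟩

-- per-pair agreement of the two keep/drop tests
lemma pv_any_or {A : Type} (l : List A) (p q : A → Bool) :
    (l.any fun x => p x || q x) = (l.any p || l.any q) := by
  rw [Bool.eq_iff_iff]
  simp only [List.any_eq_true, Bool.or_eq_true]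
  constructor
  · rintro ⟨x, hx, h | h⟩
    exacts [Or.inl ⟨x, hx, h⟩, Or.inr ⟨x, hx, h⟩]
  · rintro (⟨x, hx, h⟩ | ⟨x, hx, h⟩)
    exacts [⟨x, hx, Or.inl h⟩, ⟨x, hx, Or.inr h⟩]

lemma pv_htag_eq (qa_ids : List Int) (s : String) :
    pvHasTag (PySem.Set.ofList (qa_ids.map PySem.Int.toChars)) s.toList
      = qa_ids.any (fun id => PySem.Str.isIn ("#" ++ PySem.Int.toStr id) s) := by
  rw [Bool.eq_iff_iff, pv_hasTag_iff]
  simp only [List.any_eq_true]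
  refine exists_congr fun id => and_congr_right fun _ => ?_
  rw [PySem.Str.isIn_iff_infix, String.toList_append, PySem.Int.toList_toStr]
  rfl

lemma pv_bool_shuffle (t1 t2 pq pa tq ta : Bool) :
    (!((t1 || t2) || ((pq || pa) || ((tq || ta) || false))))
      = (!(t1 || t2 || (pq || tq) || (pa || ta))) := by
  cases t1 <;> cases t2 <;> cases pq <;> cases pa <;> cases tq <;> cases ta <;> rfl

lemma pv_pred_eq (qa_ids : List Int) (p : String × String) :
    (!((qa_ids.any (fun qa_id =>
        PySem.Str.isIn ("#" ++ PySem.Int.toStr qa_id) p.1 ||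
        PySem.Str.isIn ("#" ++ PySem.Int.toStr qa_id) p.2)) ||
      (([("pedestrian" : String), "traffic light"]).any (fun kw =>
        PySem.Str.isIn kw (PySem.Str.lower p.1) ||
        PySem.Str.isIn kw (PySem.Str.lower p.2)))))
    = (!(pvHasTag (PySem.Set.ofList (qa_ids.map PySem.Int.toChars)) p.1.toList ||
         pvHasTag (PySem.Set.ofList (qa_ids.map PySem.Int.toChars)) p.2.toList ||
         pvHasKw p.1 || pvHasKw p.2)) := by
  rw [pv_any_or qa_ids
        (fun qa_id => PySem.Str.isIn ("#" ++ PySem.Int.toStr qa_id) p.1)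
        (fun qa_id => PySem.Str.isIn ("#" ++ PySem.Int.toStr qa_id) p.2),
      ← pv_htag_eq qa_ids p.1, ← pv_htag_eq qa_ids p.2]
  simp only [List.any_cons, List.any_nil, pvHasKw]
  exact pv_bool_shuffle _ _ _ _ _ _

-- ===== VERDICT (by name: the statement is the Claim_ definition above) =====
theorem filter_qa_by_id_spec : Claim_equal_filter_qa_by_id := by
  intro questions answers qa_ids _
  show filter_qa_by_id questions answers qa_ids = filter_qa_by_id_alt questions answers qa_ids
  show ((questions.zip answers).filter (fun p =>
      !((qa_ids.any (fun qa_id =>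
          PySem.Str.isIn ("#" ++ PySem.Int.toStr qa_id) p.1 ||
          PySem.Str.isIn ("#" ++ PySem.Int.toStr qa_id) p.2)) ||
        (([("pedestrian" : String), "traffic light"]).any (fun kw =>
          PySem.Str.isIn kw (PySem.Str.lower p.1) ||
          PySem.Str.isIn kw (PySem.Str.lower p.2)))))).map (fun p => [p.1, p.2])
    = (questions.zip answers).foldl (fun out p =>
        if !(pvHasTag (PySem.Set.ofList (qa_ids.map PySem.Int.toChars)) p.1.toList ||
             pvHasTag (PySem.Set.ofList (qa_ids.map PySem.Int.toChars)) p.2.toList ||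
             pvHasKw p.1 || pvHasKw p.2)
        then out ++ [[p.1, p.2]] else out) []
  rw [PySem.List.foldl_append_if
    (p := fun p : String × String =>
      !(pvHasTag (PySem.Set.ofList (qa_ids.map PySem.Int.toChars)) p.1.toList ||
        pvHasTag (PySem.Set.ofList (qa_ids.map PySem.Int.toChars)) p.2.toList ||
        pvHasKw p.1 || pvHasKw p.2))
    (f := fun p : String × String => [p.1, p.2])]
  rw [List.nil_append]
  rw [List.filter_congr (fun p _ => pv_pred_eq qa_ids p)]
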